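-- pv_equiv track=rewrite | github.com/observIQ/otel-distro-builder | builder/src/platforms.py | parse_platforms
-- ===== SOURCE A (Python) =====
-- from typing import List, Optional, Tuple
--
-- def parse_platform_pairs(platforms: Optional[str]) -> List[Tuple[str, str]]:
--     """
--     Parse platforms string into a list of (os, arch) pairs.
--
--     Args:
--         platforms: Comma-separated list of platforms in GOOS/GOARCH format
--                    (e.g. "linux/amd64,darwin/arm64")
--
--     Returns:
--         List of (os, arch) tuples preserving the exact requested pairs.
--     """
--     if not platforms:
--         return []
--
--     pairs: list[Tuple[str, str]] = []
--     seen: set[Tuple[str, str]] = set()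
--
--     for plat in platforms.split(","):
--         if not plat.strip():
--             continue
--
--         parts = plat.split("/")
--         if len(parts) != 2:
--             continue
--
--         os_name = parts[0].strip()
--         arch = parts[1].strip()
--         if not os_name or not arch:
--             continue
--
--         pair = (os_name, arch)
--         if pair not in seen:
--             seen.add(pair)
--             pairs.append(pair)
--
--     return pairs
--
-- def parse_platforms(platforms: Optional[str]) -> Tuple[List[str], List[str]]:
--     """
--     Parse platforms string into lists of operating systems and architectures.
--
--     Args:
--         platforms: Comma-separated list of platforms in GOOS/GOARCH format
--                    (e.g. linux/amd64,linux/arm64)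
--
--     Returns:
--         Tuple of (list of operating systems, list of architectures)
--     """
--     pairs = parse_platform_pairs(platforms)
--     if not pairs:
--         return [], []
--
--     os_set = set()
--     arch_set = set()
--     for os_name, arch in pairs:
--         os_set.add(os_name)
--         arch_set.add(arch)
--
--     return sorted(list(os_set)), sorted(list(arch_set))
-- ===== SOURCE B (Python) =====
-- from typing import List, Optional, Tuple
--
-- def parse_platforms(platforms: Optional[str]) -> Tuple[List[str], List[str]]:
--     """Single pass: collect OS and arch names directly into two sets."""
--     os_set: set = set()
--     arch_set: set = set()
--     for plat in (platforms or "").split(","):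
--         if not plat.strip():
--             continue
--         parts = plat.split("/")
--         if len(parts) != 2:
--             continue
--         os_name = parts[0].strip()
--         arch = parts[1].strip()
--         if not os_name or not arch:
--             continue
--         os_set.add(os_name)
--         arch_set.add(arch)
--     return sorted(os_set), sorted(arch_set)
-- ===== Notes on version B (the rewrite author's own statement) =====
-- stated objective: simpler
-- what changed: B is one self-contained single-pass loop that adds os/arch names directly into two sets, dropping A's helper function, its intermediate pairs list and its seen-set pair-level deduplication and second pass.
import Mathlib
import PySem

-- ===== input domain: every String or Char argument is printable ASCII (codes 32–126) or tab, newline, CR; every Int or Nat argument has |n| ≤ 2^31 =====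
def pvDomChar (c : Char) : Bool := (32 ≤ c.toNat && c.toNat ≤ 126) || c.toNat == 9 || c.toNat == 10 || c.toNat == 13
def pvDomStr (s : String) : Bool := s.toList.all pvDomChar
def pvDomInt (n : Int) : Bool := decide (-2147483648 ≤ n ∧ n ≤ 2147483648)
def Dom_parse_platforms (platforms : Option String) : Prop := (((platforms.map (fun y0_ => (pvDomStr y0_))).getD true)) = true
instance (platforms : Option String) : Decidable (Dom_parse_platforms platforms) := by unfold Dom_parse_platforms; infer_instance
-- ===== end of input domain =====

-- B is one self-contained single-pass loop filling two sets directly (no helper, no pairs list,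
-- no seen-set pair deduplication, no second pass); objective: simpler.

-- ===== PORT A =====
def pvStepA (st : List (String × String) × PySem.Set (String × String)) (plat : String) :
    List (String × String) × PySem.Set (String × String) :=
  if PySem.Str.strip plat = "" then st
  else
    let parts := ((PySem.Str.split? plat "/").getD [])
    if parts.length ≠ 2 then st
    else
      let os_name := PySem.Str.strip (PySem.List.pyGetD parts 0 "")
      let arch := PySem.Str.strip (PySem.List.pyGetD parts 1 "")
      if os_name = "" ∨ arch = "" then st
      else
        let pair := (os_name, arch)
        if st.2.contains pair then st
        else (st.1 ++ [pair], PySem.Set.add st.2 pair)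

def parse_platform_pairs (platforms : Option String) : List (String × String) :=
  match platforms with
  | none => []
  | some s =>
    if s = "" then []
    else ((((PySem.Str.split? s ",").getD [])).foldl pvStepA ([], PySem.Set.empty)).1

def parse_platforms (platforms : Option String) : List String × List String :=
  let pairs := parse_platform_pairs platforms
  if pairs = [] then ([], [])
  else
    let sets := pairs.foldl
      (fun st p => (PySem.Set.add st.1 p.1, PySem.Set.add st.2 p.2))
      ((PySem.Set.empty : PySem.Set String), (PySem.Set.empty : PySem.Set String))
    (PySem.List.sorted sets.1 (fun x => x), PySem.List.sorted sets.2 (fun x => x))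

-- ===== PORT B =====
def pvStepB (st : PySem.Set String × PySem.Set String) (plat : String) :
    PySem.Set String × PySem.Set String :=
  if PySem.Str.strip plat = "" then st
  else
    match ((PySem.Str.split? plat "/").getD []) with
    | [p0, p1] =>
      let os_name := PySem.Str.strip p0
      let arch := PySem.Str.strip p1
      if os_name = "" ∨ arch = "" then st
      else (PySem.Set.add st.1 os_name, PySem.Set.add st.2 arch)
    | _ => st

def parse_platforms_alt (platforms : Option String) : List String × List String :=
  let r := ((PySem.Str.split? (platforms.getD "") ",").getD []).foldl pvStepB
    ((PySem.Set.empty : PySem.Set String), (PySem.Set.empty : PySem.Set String))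
  (PySem.List.sorted r.1 (fun x => x), PySem.List.sorted r.2 (fun x => x))

-- ===== PRECONDITION & SPEC =====
def Spec_parse_platforms (platforms : Option String) (out : List String × List String) : Prop := out = parse_platforms_alt platforms
instance (platforms : Option String) (out : List String × List String) : Decidable (Spec_parse_platforms platforms out) := by unfold Spec_parse_platforms; infer_instance

-- ===== CLAIM (what is proved, stated in full; the proofs are below) =====
def Claim_equal_parse_platforms : Prop := ∀ (platforms : Option String), Dom_parse_platforms platforms → Spec_parse_platforms platforms (parse_platforms platforms)

-- ===== LEMMAS AND PROOFS =====
-- the common per-entry validation, used only by the proofs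
def pvValid (plat : String) : Option (String × String) :=
  if PySem.Str.strip plat = "" then none
  else
    match ((PySem.Str.split? plat "/").getD []) with
    | [p0, p1] =>
      let os_name := PySem.Str.strip p0
      let arch := PySem.Str.strip p1
      if os_name = "" ∨ arch = "" then none else some (os_name, arch)
    | _ => none

theorem pvStepA_eq (p : List (String × String)) (plat : String) :
    pvStepA (p, p) plat =
      match pvValid plat with
      | none => (p, p)
      | some pr => (PySem.Set.add p pr, PySem.Set.add p pr) := by
  unfold pvStepA pvValid
  rcases h : ((PySem.Str.split? plat "/").getD []) with _ | ⟨a, _ | ⟨b, _ | ⟨c, t⟩⟩⟩ <;>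
    simp [h, PySem.Set.add, PySem.Set.contains] <;> split_ifs <;>
    simp_all [PySem.List.pyGetD_zero_cons, PySem.List.pyGetD_ofNat' (k := 1), PySem.Set.add, PySem.Set.contains]

theorem pvFoldA_eq (entries : List String) (p : List (String × String)) :
    entries.foldl pvStepA (p, p) =
      ((entries.filterMap pvValid).foldl PySem.Set.add p,
       (entries.filterMap pvValid).foldl PySem.Set.add p) := by
  induction entries generalizing p with
  | nil => rfl
  | cons e es ih =>
    simp only [List.foldl_cons, List.filterMap_cons, pvStepA_eq]
    cases h : pvValid e <;> simp [h, ih]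

theorem pvFoldPairs_eq (l : List (String × String)) (u v : PySem.Set String) :
    l.foldl (fun st p => (PySem.Set.add st.1 p.1, PySem.Set.add st.2 p.2)) (u, v) =
      ((l.map Prod.fst).foldl PySem.Set.add u, (l.map Prod.snd).foldl PySem.Set.add v) := by
  induction l generalizing u v with
  | nil => rfl
  | cons x xs ih => simp [ih]

theorem pvStepB_eq (u v : PySem.Set String) (plat : String) :
    pvStepB (u, v) plat =
      match pvValid plat with
      | none => (u, v)
      | some pr => (PySem.Set.add u pr.1, PySem.Set.add v pr.2) := by
  unfold pvStepB pvValid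
  rcases h : ((PySem.Str.split? plat "/").getD []) with _ | ⟨a, _ | ⟨b, _ | ⟨c, t⟩⟩⟩ <;>
    simp [h] <;> split_ifs <;> simp_all

theorem pvFoldB_eq (entries : List String) (u v : PySem.Set String) :
    entries.foldl pvStepB (u, v) =
      (((entries.filterMap pvValid).map Prod.fst).foldl PySem.Set.add u,
       ((entries.filterMap pvValid).map Prod.snd).foldl PySem.Set.add v) := by
  induction entries generalizing u v with
  | nil => rfl
  | cons e es ih =>
    simp only [List.foldl_cons, List.filterMap_cons, pvStepB_eq]
    cases h : pvValid e <;> simp [h, ih]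

-- the two sides collect permutations of the same distinct names, so sorted agrees
theorem pvSorted_proj_eq (V : List (String × String)) (f : String × String → String) :
    PySem.List.sorted (PySem.Set.ofList ((PySem.Set.ofList V).map f)) (fun x => x) =
      PySem.List.sorted (PySem.Set.ofList (V.map f)) (fun x => x) := by
  rw [PySem.List.sorted_id_eq_sorted_id_iff_perm]
  rw [List.perm_ext_iff_of_nodup (PySem.Set.nodup_ofList _) (PySem.Set.nodup_ofList _)]
  intro a
  simp [PySem.Set.mem_ofList, List.mem_map]

theorem pvOfList_nil_iff (V : List (String × String)) :
    PySem.Set.ofList V = [] ↔ V = [] := by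
  constructor
  · intro h
    cases V with
    | nil => rfl
    | cons x xs =>
      have : x ∈ PySem.Set.ofList (x :: xs) := (PySem.Set.mem_ofList _ _).mpr (List.mem_cons_self)
      simp [h] at this
  · intro h; subst h; rfl

-- ===== VERDICT (by name: the statement is the Claim_ definition above) =====
theorem parse_platforms_spec : Claim_equal_parse_platforms := by
  intro platforms _
  unfold Spec_parse_platforms parse_platforms parse_platforms_alt parse_platform_pairs
  cases platforms with
  | none => decide
  | some s =>
    by_cases hs : s = ""
    · subst hs; decide
    · simp only [hs, if_false, Option.getD_some]
      have hA := pvFoldA_eq (((PySem.Str.split? s ",").getD [])) []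
      have hB := pvFoldB_eq (((PySem.Str.split? s ",").getD [])) PySem.Set.empty PySem.Set.empty
      set V := (((PySem.Str.split? s ",").getD [])).filterMap pvValid with hV
      rw [show (PySem.Set.empty : PySem.Set (String × String)) = [] from rfl] at *
      rw [show (PySem.Set.empty : PySem.Set String) = [] from rfl] at *
      have hofl : ∀ {α : Type} [BEq α] (l : List α), l.foldl PySem.Set.add ([] : PySem.Set α) = PySem.Set.ofList l := by
        intro α _ l; rw [PySem.Set.ofList_eq_foldl]
      have hAp : ((((PySem.Str.split? s ",").getD [])).foldl pvStepA (([] : List (String × String)), ([] : PySem.Set (String × String)))).1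
          = PySem.Set.ofList V := by
        rw [hA]; exact hofl V
      rw [hAp, hB, hofl, hofl]
      by_cases hN : PySem.Set.ofList V = []
      · have hVnil : V = [] := (pvOfList_nil_iff V).mp hN
        simp [hVnil, PySem.List.sorted_eq_nil_iff]
      · simp only [hN, if_false]
        rw [pvFoldPairs_eq, hofl, hofl]
        dsimp only
        exact congrArg₂ Prod.mk (pvSorted_proj_eq V Prod.fst) (pvSorted_proj_eq V Prod.snd)
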